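-- pv_equiv track=rewrite | github.com/Lor3nzoR/Progetto_laboratorio | backend/src/utilities/md_cleaning.py | clean_markdown_noise
-- ===== SOURCE A (Python) =====
-- from typing import Iterable
--
-- def clean_markdown_noise(raw_markdown: str, noise_indicators: Iterable[str]) -> str:
--     """
--     Rimuove righe di rumore, avvisi e righe vuote da un testo markdown.
--     Il filtro e per sottostringa, quindi cattura anche varianti dello stesso boilerplate.
--     """
--     lines = raw_markdown.split('\n')
--     cleaned_lines = []
--
--     # Normalizza una sola volta gli indicatori per evitare lavoro ripetuto nel loop.
--     noise_list = [str(ind).strip().lower() for ind in noise_indicators]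
--
--     for line in lines:
--         l_strip = line.strip()
--
--         # Le righe vuote vengono scartate qui; eventuale separazione semantica
--         # puo essere ricostruita in un passaggio successivo del parser.
--         if not l_strip:
--             continue
--
--         # Il match per sottostringa rende robusto il filtro a prefissi e suffissi.
--         if any(indicator in l_strip.lower() for indicator in noise_list):
--             continue
--
--         cleaned_lines.append(line)
--
--     return '\n'.join(cleaned_lines)
-- ===== SOURCE B (Python) =====
-- def clean_markdown_noise(raw_markdown, noise_indicators):
--     # Multi-pattern search by hashed windows: put the normalized patterns in a
--     # set, and for each candidate line slide a window of each distinct pattern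
--     # length over it, testing each window by one set lookup; no per-indicator
--     # substring scan is ever run.
--     patterns = {str(ind).strip().lower() for ind in noise_indicators}
--     lengths = sorted({len(p) for p in patterns})
--
--     def noisy(low):
--         n = len(low)
--         return any(low[i:i + L] in patterns
--                    for L in lengths
--                    for i in range(n - L + 1))
--
--     kept = [line for line in raw_markdown.split('\n')
--             if (low := line.strip().lower()) and not noisy(low)]
--     return '\n'.join(kept)
-- ===== Notes on version B (the rewrite author's own statement) =====
-- stated objective: alternative
-- what changed: B turns the per-indicator substring search into a hashed-window multi-pattern search: the normalized indicators are stored in a set once, and each candidate line is scanned by sliding a window of each distinct pattern length over it and testing the window with one set lookup, so per-line work scales with the number of distinct indicator lengths instead of the number of indicators (it trades the C-level 'in' scan per indicator for per-window set lookups).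
import Mathlib
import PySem

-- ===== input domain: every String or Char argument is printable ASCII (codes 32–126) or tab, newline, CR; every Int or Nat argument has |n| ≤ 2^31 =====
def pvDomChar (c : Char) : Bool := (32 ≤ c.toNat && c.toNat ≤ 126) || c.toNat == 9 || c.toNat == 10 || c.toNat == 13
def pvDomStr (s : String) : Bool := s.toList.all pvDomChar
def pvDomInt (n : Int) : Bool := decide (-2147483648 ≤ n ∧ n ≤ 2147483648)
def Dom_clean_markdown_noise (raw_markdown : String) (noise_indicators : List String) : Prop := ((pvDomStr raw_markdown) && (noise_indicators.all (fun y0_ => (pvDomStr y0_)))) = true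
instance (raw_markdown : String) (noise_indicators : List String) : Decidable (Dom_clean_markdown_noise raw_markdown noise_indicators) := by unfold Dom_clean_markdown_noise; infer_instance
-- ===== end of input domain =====

-- B replaces A's per-indicator substring search by a hashed-window multi-pattern search:
-- the normalized indicators go into a set once, and each line is scanned by sliding a
-- window of each distinct pattern length and testing the window by one set lookup, so
-- per-line work scales with the distinct pattern lengths rather than the indicator count.
-- Objective: alternative.

-- ===== PORT A =====
def clean_markdown_noise (raw_markdown : String) (noise_indicators : List String) : String :=
  let lines := PySem.Chars.splitOn raw_markdown.toList ['\n']   -- raw_markdown.split('\n'); sep ≠ "" so exact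
  let noise_list := noise_indicators.map (fun ind => PySem.Chars.lower (PySem.Chars.strip ind.toList))
  let cleaned_lines := lines.foldl (fun acc line =>
    let l_strip := PySem.Chars.strip line
    if l_strip.isEmpty then acc                                  -- if not l_strip: continue
    else if noise_list.any (fun indicator => PySem.Chars.isIn indicator (PySem.Chars.lower l_strip)) then acc
    else acc ++ [line]) []
  String.ofList (PySem.Chars.join ['\n'] cleaned_lines)          -- '\n'.join(...)

-- ===== PORT B =====
-- noisy(low): any(low[i:i+L] in patterns for L in lengths for i in range(len(low)-L+1))
def pvNoisy (low : List Char) (patterns : PySem.Set (List Char)) (lengths : List Nat) : Bool :=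
  lengths.any (fun L =>
    (PySem.List.pyRange 0 ((low.length : Int) - (L : Int) + 1) 1).any (fun i =>
      PySem.Set.contains patterns (PySem.List.slice low (some i) (some (i + (L : Int))))))

def clean_markdown_noise_alt (raw_markdown : String) (noise_indicators : List String) : String :=
  -- patterns = {ind.strip().lower() for ind in noise_indicators}
  let patterns : PySem.Set (List Char) :=
    PySem.Set.ofList (noise_indicators.map (fun ind => PySem.Chars.lower (PySem.Chars.strip ind.toList)))
  -- lengths = sorted({len(p) for p in patterns})
  let lengths : List Nat :=
    PySem.List.sorted (PySem.Set.ofList (patterns.map List.length)) (fun x => x) false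
  let kept := (PySem.Chars.splitOn raw_markdown.toList ['\n']).filter (fun line =>
    let low := PySem.Chars.lower (PySem.Chars.strip line)
    !low.isEmpty && !pvNoisy low patterns lengths)
  String.ofList (PySem.Chars.join ['\n'] kept)

-- ===== PRECONDITION & SPEC =====
def Spec_clean_markdown_noise (raw_markdown : String) (noise_indicators : List String) (out : String) : Prop := out = clean_markdown_noise_alt raw_markdown noise_indicators
instance (raw_markdown : String) (noise_indicators : List String) (out : String) : Decidable (Spec_clean_markdown_noise raw_markdown noise_indicators out) := by unfold Spec_clean_markdown_noise; infer_instance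

-- ===== CLAIM =====
def Claim_equal_clean_markdown_noise : Prop := ∀ (raw_markdown : String) (noise_indicators : List String), Dom_clean_markdown_noise raw_markdown noise_indicators → Spec_clean_markdown_noise raw_markdown noise_indicators (clean_markdown_noise raw_markdown noise_indicators)

-- ===== LEMMAS AND PROOFS =====

-- B's hashed-window scan hits iff some pattern of the list is a substring (A's 'in' test).
theorem pvNoisy_eq (low : List Char) (ps : List (List Char)) :
    pvNoisy low (PySem.Set.ofList ps)
      (PySem.List.sorted (PySem.Set.ofList ((PySem.Set.ofList ps).map List.length)) (fun x => x) false)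
    = ps.any (fun p => PySem.Chars.isIn p low) := by
  apply Bool.eq_iff_iff.mpr
  simp only [pvNoisy, List.any_eq_true, PySem.List.mem_sorted, PySem.Set.mem_ofList,
    List.mem_map, PySem.List.mem_pyRange_one, PySem.Set.contains_iff]
  constructor
  · rintro ⟨L, -, i, ⟨hi0, -⟩, hw⟩
    have hsl : PySem.List.slice low (some i) (some (i + (L : Int))) = (low.drop i.toNat).take L := by
      rw [PySem.List.slice_toNat low hi0 (by omega)]
      congr 1
      omega
    rw [hsl] at hw
    refine ⟨_, hw, ?_⟩
    rw [PySem.Chars.isIn_iff_infix]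
    exact (List.take_prefix L (low.drop i.toNat)).isInfix.trans (List.drop_suffix i.toNat low).isInfix
  · rintro ⟨p, hp, hin⟩
    obtain ⟨j, hpre⟩ := (PySem.Chars.exists_prefix_drop_iff_isIn p low).mpr hin
    have hLle := hpre.length_le
    rw [List.length_drop] at hLle
    by_cases hj : j ≤ low.length
    · refine ⟨p.length, ⟨p, hp, rfl⟩, (j : Int), ⟨by positivity, by omega⟩, ?_⟩
      have hsl : PySem.List.slice low (some (j : Int)) (some ((j : Int) + (p.length : Int)))
          = (low.drop j).take p.length := by
        rw [PySem.List.slice_toNat low (by positivity) (by positivity)]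
        congr 1; omega
      rw [hsl, ← List.prefix_iff_eq_take.mp hpre]
      exact hp
    · have hnil : low.drop j = [] := List.drop_eq_nil_of_le (by omega)
      rw [hnil] at hpre
      have hp0 : p = [] := List.prefix_nil.mp hpre
      refine ⟨0, ⟨p, hp, by simp [hp0]⟩, 0, ⟨le_refl 0, by omega⟩, ?_⟩
      have hsl : PySem.List.slice low (some 0) (some ((0 : Int) + ((0 : Nat) : Int))) = [] := by
        rw [PySem.List.slice_toNat low (by omega) (by omega)]
        simp
      rw [hsl, ← hp0]
      exact hp

-- A's per-line double skip equals B's keep predicate ('lower' preserves emptiness).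
theorem pvBody_eq (noise : List String) :
    (fun (acc : List (List Char)) (line : List Char) =>
      let l_strip := PySem.Chars.strip line
      if l_strip.isEmpty then acc
      else if (noise.map (fun ind => PySem.Chars.lower (PySem.Chars.strip ind.toList))).any
              (fun indicator => PySem.Chars.isIn indicator (PySem.Chars.lower l_strip)) then acc
      else acc ++ [line])
    = (fun acc line =>
      if (fun line =>
          let low := PySem.Chars.lower (PySem.Chars.strip line)
          !low.isEmpty && !pvNoisy low
            (PySem.Set.ofList (noise.map (fun ind => PySem.Chars.lower (PySem.Chars.strip ind.toList))))
            (PySem.List.sorted (PySem.Set.ofList ((PySem.Set.ofList (noise.map (fun ind => PySem.Chars.lower (PySem.Chars.strip ind.toList)))).map List.length)) (fun x => x) false)) line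
      then acc ++ [line] else acc) := by
  funext acc line
  simp only [pvNoisy_eq]
  have hlen : (PySem.Chars.lower (PySem.Chars.strip line)).isEmpty
      = (PySem.Chars.strip line).isEmpty := by
    simp [PySem.Chars.lower]
  by_cases h1 : (PySem.Chars.strip line).isEmpty
  · simp [h1, hlen]
  · by_cases h2 : ((noise.map (fun ind => PySem.Chars.lower (PySem.Chars.strip ind.toList))).any
        (fun indicator => PySem.Chars.isIn indicator (PySem.Chars.lower (PySem.Chars.strip line)))) <;>
      simp [h1, h2, hlen]

-- ===== VERDICT =====
theorem clean_markdown_noise_spec : Claim_equal_clean_markdown_noise := by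
  intro raw noise _
  show clean_markdown_noise raw noise = clean_markdown_noise_alt raw noise
  unfold clean_markdown_noise clean_markdown_noise_alt
  simp only []
  congr 1
  rw [pvBody_eq noise, PySem.List.foldl_append_if_eq_filter]
  rfl
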